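-- pv_equiv track=rewrite | github.com/lengthwisehems/retail2 | rollas_inventory.py | derive_jean_style
-- ===== SOURCE A (Python) =====
-- from typing import Any, Dict, Iterable, List, Optional
--
-- def derive_jean_style(tags: Iterable[str]) -> str:
--     tags_lower = [tag.lower() for tag in tags if tag]
--
--     def tag_contains(keyword: str) -> bool:
--         return any(keyword in tag for tag in tags_lower)
--
--     def tag_startswith(prefix: str) -> bool:
--         return any(tag.startswith(prefix) for tag in tags_lower)
--
--     fit_tags = [tag for tag in tags_lower if tag.startswith("fit:")]
--     fit_swatch_tags = [tag for tag in tags_lower if tag.startswith("fit_swatch:")]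
--     style_tags = [tag for tag in tags_lower if tag.startswith("style:")]
--
--     def contains_any(sources: List[str], keywords: Iterable[str]) -> bool:
--         return any(any(keyword in tag for keyword in keywords) for tag in sources)
--
--     wide_sources = fit_tags + fit_swatch_tags + style_tags
--     if contains_any(wide_sources, ["sailor", "wide", "wide_women"]):
--         return "Wide Leg"
--
--     straight_sources = fit_tags + fit_swatch_tags + style_tags
--     if contains_any(straight_sources, ["original straight", "straight", "heidi low", "straight_women"]):
--         return "Straight"
--
--     if contains_any(fit_tags + fit_swatch_tags + style_tags, ["eastcoast flare", "flare", "flare_women"]):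
--         return "Flare"
--
--     if contains_any(fit_tags + fit_swatch_tags + style_tags, ["barrel"]):
--         return "Barrel"
--
--     if contains_any(fit_swatch_tags, ["90s", "baggy", "relaxed", "loose", "boyfriend"]):
--         return "Baggy"
--
--     if contains_any(fit_swatch_tags, ["boot"]):
--         return "Bootcut"
--
--     return ""
-- ===== SOURCE B (Python) =====
-- def derive_jean_style(tags):
--     # One collecting pass over the tags, then a priority lookup (alternative decomposition).
--     found = set()
--     for tag in tags:
--         if not tag:
--             continue
--         t = tag.lower()
--         swatch = t.startswith("fit_swatch:")
--         if swatch or t.startswith("fit:") or t.startswith("style:"):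
--             if "sailor" in t or "wide" in t:
--                 found.add("Wide Leg")
--             if "straight" in t or "heidi low" in t:
--                 found.add("Straight")
--             if "flare" in t:
--                 found.add("Flare")
--             if "barrel" in t:
--                 found.add("Barrel")
--             if swatch:
--                 if any(k in t for k in ("90s", "baggy", "relaxed", "loose", "boyfriend")):
--                     found.add("Baggy")
--                 if "boot" in t:
--                     found.add("Bootcut")
--     for style in ("Wide Leg", "Straight", "Flare", "Barrel", "Baggy", "Bootcut"):
--         if style in found:
--             return style
--     return ""
-- ===== Notes on version B (the rewrite author's own statement) =====
-- stated objective: alternative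
-- what changed: B makes a single collecting pass over the tags, recording each implied style in a set, then returns the first present style in the fixed priority order, instead of A's per-style re-scans of three prebuilt prefix-filtered lists concatenated for every style check.
import Mathlib
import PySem

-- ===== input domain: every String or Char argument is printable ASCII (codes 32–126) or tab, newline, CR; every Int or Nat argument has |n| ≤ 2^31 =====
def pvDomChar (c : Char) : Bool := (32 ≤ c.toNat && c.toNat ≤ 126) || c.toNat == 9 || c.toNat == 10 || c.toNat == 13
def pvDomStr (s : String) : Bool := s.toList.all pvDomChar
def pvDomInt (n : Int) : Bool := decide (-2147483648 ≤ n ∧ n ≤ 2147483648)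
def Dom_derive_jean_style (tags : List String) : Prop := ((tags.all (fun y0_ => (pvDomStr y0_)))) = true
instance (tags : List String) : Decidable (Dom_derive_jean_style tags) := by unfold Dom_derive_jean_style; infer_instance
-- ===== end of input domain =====

-- B replaces A's per-style re-scans of concatenated prefix lists by ONE collecting pass
-- into a set plus a fixed-priority lookup (objective: alternative decomposition, same result).

-- ===== PORT A =====
def derive_jean_style (tags : List String) : String :=
  let tags_lower := (tags.filter (fun tag => tag ≠ "")).map PySem.Str.lower
  let fit_tags := tags_lower.filter (fun tag => PySem.Str.startswith tag "fit:")
  let fit_swatch_tags := tags_lower.filter (fun tag => PySem.Str.startswith tag "fit_swatch:")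
  let style_tags := tags_lower.filter (fun tag => PySem.Str.startswith tag "style:")
  let contains_any := fun (sources : List String) (keywords : List String) =>
    sources.any (fun tag => keywords.any (fun keyword => PySem.Str.isIn keyword tag))
  let wide_sources := fit_tags ++ fit_swatch_tags ++ style_tags
  if contains_any wide_sources ["sailor", "wide", "wide_women"] then "Wide Leg"
  else
    let straight_sources := fit_tags ++ fit_swatch_tags ++ style_tags
    if contains_any straight_sources ["original straight", "straight", "heidi low", "straight_women"] then "Straight"
    else if contains_any (fit_tags ++ fit_swatch_tags ++ style_tags) ["eastcoast flare", "flare", "flare_women"] then "Flare"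
    else if contains_any (fit_tags ++ fit_swatch_tags ++ style_tags) ["barrel"] then "Barrel"
    else if contains_any fit_swatch_tags ["90s", "baggy", "relaxed", "loose", "boyfriend"] then "Baggy"
    else if contains_any fit_swatch_tags ["boot"] then "Bootcut"
    else ""

-- ===== PORT B =====
-- one step of Source B's collecting loop
def pvStepB (found : PySem.Set String) (tag : String) : PySem.Set String :=
  if tag = "" then found
  else
    let t := PySem.Str.lower tag
    let swatch := PySem.Str.startswith t "fit_swatch:"
    if swatch || PySem.Str.startswith t "fit:" || PySem.Str.startswith t "style:" then
      let f1 := if PySem.Str.isIn "sailor" t || PySem.Str.isIn "wide" t then PySem.Set.add found "Wide Leg" else found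
      let f2 := if PySem.Str.isIn "straight" t || PySem.Str.isIn "heidi low" t then PySem.Set.add f1 "Straight" else f1
      let f3 := if PySem.Str.isIn "flare" t then PySem.Set.add f2 "Flare" else f2
      let f4 := if PySem.Str.isIn "barrel" t then PySem.Set.add f3 "Barrel" else f3
      let f5 := if swatch && (PySem.Str.isIn "90s" t || PySem.Str.isIn "baggy" t || PySem.Str.isIn "relaxed" t || PySem.Str.isIn "loose" t || PySem.Str.isIn "boyfriend" t)
                then PySem.Set.add f4 "Baggy" else f4
      let f6 := if swatch && PySem.Str.isIn "boot" t then PySem.Set.add f5 "Bootcut" else f5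
      f6
    else found

def derive_jean_style_alt (tags : List String) : String :=
  let found := tags.foldl pvStepB PySem.Set.empty
  if PySem.Set.contains found "Wide Leg" then "Wide Leg"
  else if PySem.Set.contains found "Straight" then "Straight"
  else if PySem.Set.contains found "Flare" then "Flare"
  else if PySem.Set.contains found "Barrel" then "Barrel"
  else if PySem.Set.contains found "Baggy" then "Baggy"
  else if PySem.Set.contains found "Bootcut" then "Bootcut"
  else ""

-- ===== PRECONDITION & SPEC =====
def Spec_derive_jean_style (tags : List String) (out : String) : Prop := out = derive_jean_style_alt tags
instance (tags : List String) (out : String) : Decidable (Spec_derive_jean_style tags out) := by unfold Spec_derive_jean_style; infer_instance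

-- ===== CLAIM (what is proved, stated in full; the proofs are below) =====
def Claim_equal_derive_jean_style : Prop := ∀ (tags : List String), Dom_derive_jean_style tags → Spec_derive_jean_style tags (derive_jean_style tags)

-- ===== LEMMAS AND PROOFS =====

-- what a single tag contributes to B's set, as a flat boolean
def pvAdds (tag : String) (x : String) : Bool :=
  let t := PySem.Str.lower tag
  !(tag = "") &&
  (PySem.Str.startswith t "fit_swatch:" || PySem.Str.startswith t "fit:" || PySem.Str.startswith t "style:") &&
  ( (x = "Wide Leg") && (PySem.Str.isIn "sailor" t || PySem.Str.isIn "wide" t)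
  || (x = "Straight") && (PySem.Str.isIn "straight" t || PySem.Str.isIn "heidi low" t)
  || (x = "Flare") && PySem.Str.isIn "flare" t
  || (x = "Barrel") && PySem.Str.isIn "barrel" t
  || (x = "Baggy") && PySem.Str.startswith t "fit_swatch:" &&
       (PySem.Str.isIn "90s" t || PySem.Str.isIn "baggy" t || PySem.Str.isIn "relaxed" t || PySem.Str.isIn "loose" t || PySem.Str.isIn "boyfriend" t)
  || (x = "Bootcut") && PySem.Str.startswith t "fit_swatch:" && PySem.Str.isIn "boot" t )

theorem mem_ite_add (c : Bool) (s : PySem.Set String) (y x : String) :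
    (x ∈ if c = true then PySem.Set.add s y else s) ↔ x ∈ s ∨ (c = true ∧ x = y) := by
  cases c <;> simp [PySem.Set.mem_add]

set_option maxHeartbeats 1600000 in
theorem mem_pvStepB (s : PySem.Set String) (tag x : String)
    (hx : x = "Wide Leg" ∨ x = "Straight" ∨ x = "Flare" ∨ x = "Barrel" ∨ x = "Baggy" ∨ x = "Bootcut") :
    x ∈ pvStepB s tag ↔ x ∈ s ∨ pvAdds tag x = true := by
  unfold pvStepB pvAdds
  by_cases h0 : tag = ""
  · simp [h0]
  · rw [if_neg h0]
    by_cases hg : (PySem.Str.startswith (PySem.Str.lower tag) "fit_swatch:" ||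
        PySem.Str.startswith (PySem.Str.lower tag) "fit:" ||
        PySem.Str.startswith (PySem.Str.lower tag) "style:") = true
    · rw [if_pos hg]
      simp only [mem_ite_add]
      rcases hx with rfl | rfl | rfl | rfl | rfl | rfl <;>
        (simp only [hg, h0, String.reduceEq, Bool.and_eq_true, Bool.or_eq_true, Bool.not_eq_true',
          decide_eq_false_iff_not, decide_eq_true_eq, not_false_iff, true_and, and_true, and_false,
          false_and, or_false, false_or, and_self] <;> tauto)
    · rw [if_neg hg]
      simp only [Bool.not_eq_true] at hg
      constructor
      · exact Or.inl
      · rintro (h | h)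
        · exact h
        · exfalso
          simp only [Bool.and_eq_true] at h
          have h21 := h.1.2
          rw [hg] at h21
          exact Bool.false_ne_true h21

theorem mem_foldl_pvStepB (tags : List String) (s : PySem.Set String) (x : String)
    (hx : x = "Wide Leg" ∨ x = "Straight" ∨ x = "Flare" ∨ x = "Barrel" ∨ x = "Baggy" ∨ x = "Bootcut") :
    x ∈ tags.foldl pvStepB s ↔ x ∈ s ∨ ∃ t ∈ tags, pvAdds t x = true := by
  induction tags generalizing s with
  | nil => simp
  | cons a l ih =>
    rw [List.foldl_cons, ih, mem_pvStepB s a x hx]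
    simp only [List.mem_cons]
    constructor
    · rintro ((h | h) | ⟨t, ht, h⟩)
      · exact Or.inl h
      · exact Or.inr ⟨a, Or.inl rfl, h⟩
      · exact Or.inr ⟨t, Or.inr ht, h⟩
    · rintro (h | ⟨t, rfl | ht, h⟩)
      · exact Or.inl (Or.inl h)
      · exact Or.inl (Or.inr h)
      · exact Or.inr ⟨t, ht, h⟩

theorem containsB (tags : List String) (x : String)
    (hx : x = "Wide Leg" ∨ x = "Straight" ∨ x = "Flare" ∨ x = "Barrel" ∨ x = "Baggy" ∨ x = "Bootcut") :
    PySem.Set.contains (tags.foldl pvStepB PySem.Set.empty) x = true ↔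
      ∃ t ∈ tags, pvAdds t x = true := by
  rw [PySem.Set.contains_iff, mem_foldl_pvStepB tags PySem.Set.empty x hx]
  simp [PySem.Set.empty]

-- substring absorption: the redundant long keywords imply the short ones
theorem isIn_of_isIn_of_infix {a b : String} (t : String)
    (hab : a.toList <:+: b.toList) (h : PySem.Str.isIn b t = true) :
    PySem.Str.isIn a t = true := by
  rw [PySem.Str.isIn_iff_infix] at h ⊢
  exact hab.trans h

theorem any_filter_map (tags : List String) (p q : String → Bool) :
    (((tags.filter (fun tag => tag ≠ "")).map PySem.Str.lower).filter p).any q = true ↔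
      ∃ tag ∈ tags, ¬tag = "" ∧ p (PySem.Str.lower tag) = true ∧ q (PySem.Str.lower tag) = true := by
  simp only [List.any_eq_true, List.mem_filter, List.mem_map]
  aesop

-- A's group-source condition (the three prefix lists concatenated), as one existential over the raw tags
theorem A3_iff (tags : List String) (kws : List String) :
    ((((tags.filter (fun tag => tag ≠ "")).map PySem.Str.lower).filter (fun tag => PySem.Str.startswith tag "fit:") ++
      ((tags.filter (fun tag => tag ≠ "")).map PySem.Str.lower).filter (fun tag => PySem.Str.startswith tag "fit_swatch:") ++
      ((tags.filter (fun tag => tag ≠ "")).map PySem.Str.lower).filter (fun tag => PySem.Str.startswith tag "style:")).any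
        (fun tag => kws.any (fun keyword => PySem.Str.isIn keyword tag)) = true) ↔
    ∃ tag ∈ tags, ¬tag = "" ∧
      (PySem.Str.startswith (PySem.Str.lower tag) "fit_swatch:" = true ∨
       PySem.Str.startswith (PySem.Str.lower tag) "fit:" = true ∨
       PySem.Str.startswith (PySem.Str.lower tag) "style:" = true) ∧
      kws.any (fun keyword => PySem.Str.isIn keyword (PySem.Str.lower tag)) = true := by
  rw [List.any_append, List.any_append]
  simp only [Bool.or_eq_true, any_filter_map]
  constructor
  · rintro ((⟨tag, ht, hne, hp, hk⟩ | ⟨tag, ht, hne, hp, hk⟩) | ⟨tag, ht, hne, hp, hk⟩)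
    · exact ⟨tag, ht, hne, Or.inr (Or.inl hp), hk⟩
    · exact ⟨tag, ht, hne, Or.inl hp, hk⟩
    · exact ⟨tag, ht, hne, Or.inr (Or.inr hp), hk⟩
  · rintro ⟨tag, ht, hne, hp | hp | hp, hk⟩
    · exact Or.inl (Or.inr ⟨tag, ht, hne, hp, hk⟩)
    · exact Or.inl (Or.inl ⟨tag, ht, hne, hp, hk⟩)
    · exact Or.inr ⟨tag, ht, hne, hp, hk⟩

-- A's swatch-only condition as one existential over the raw tags
theorem Asw_iff (tags : List String) (kws : List String) :
    ((((tags.filter (fun tag => tag ≠ "")).map PySem.Str.lower).filter (fun tag => PySem.Str.startswith tag "fit_swatch:")).any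
        (fun tag => kws.any (fun keyword => PySem.Str.isIn keyword tag)) = true) ↔
    ∃ tag ∈ tags, ¬tag = "" ∧ PySem.Str.startswith (PySem.Str.lower tag) "fit_swatch:" = true ∧
      kws.any (fun keyword => PySem.Str.isIn keyword (PySem.Str.lower tag)) = true :=
  any_filter_map tags _ _

theorem exWide (tags : List String) :
    (∃ tag ∈ tags, ¬tag = "" ∧
      (PySem.Str.startswith (PySem.Str.lower tag) "fit_swatch:" = true ∨
       PySem.Str.startswith (PySem.Str.lower tag) "fit:" = true ∨
       PySem.Str.startswith (PySem.Str.lower tag) "style:" = true) ∧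
      (["sailor", "wide", "wide_women"] : List String).any (fun keyword => PySem.Str.isIn keyword (PySem.Str.lower tag)) = true) ↔
    ∃ t ∈ tags, pvAdds t "Wide Leg" = true := by
  refine exists_congr fun tag => and_congr_right fun _ => ?_
  have habs := isIn_of_isIn_of_infix (a := "wide") (b := "wide_women") (PySem.Str.lower tag)
    ⟨[], ['_', 'w', 'o', 'm', 'e', 'n'], rfl⟩
  simp only [pvAdds, List.any_cons, List.any_nil, Bool.or_false, Bool.and_eq_true,
    Bool.or_eq_true, Bool.not_eq_true', decide_eq_false_iff_not, decide_eq_true_eq,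
    String.reduceEq, false_and, true_and, and_false, or_false, false_or, and_assoc, or_assoc]
  constructor
  · rintro ⟨h1, h2, h3⟩
    refine ⟨h1, h2, ?_⟩
    rcases h3 with h | h | h
    · exact Or.inl h
    · exact Or.inr h
    · exact Or.inr (habs h)
  · rintro ⟨h1, h2, h3⟩
    refine ⟨h1, h2, ?_⟩
    rcases h3 with h | h
    · exact Or.inl h
    · exact Or.inr (Or.inl h)

theorem exStraight (tags : List String) :
    (∃ tag ∈ tags, ¬tag = "" ∧
      (PySem.Str.startswith (PySem.Str.lower tag) "fit_swatch:" = true ∨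
       PySem.Str.startswith (PySem.Str.lower tag) "fit:" = true ∨
       PySem.Str.startswith (PySem.Str.lower tag) "style:" = true) ∧
      (["original straight", "straight", "heidi low", "straight_women"] : List String).any (fun keyword => PySem.Str.isIn keyword (PySem.Str.lower tag)) = true) ↔
    ∃ t ∈ tags, pvAdds t "Straight" = true := by
  refine exists_congr fun tag => and_congr_right fun _ => ?_
  have h1 := isIn_of_isIn_of_infix (a := "straight") (b := "original straight") (PySem.Str.lower tag)
    ⟨['o', 'r', 'i', 'g', 'i', 'n', 'a', 'l', ' '], [], by rfl⟩
  have h2 := isIn_of_isIn_of_infix (a := "straight") (b := "straight_women") (PySem.Str.lower tag)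
    ⟨[], ['_', 'w', 'o', 'm', 'e', 'n'], rfl⟩
  simp only [pvAdds, List.any_cons, List.any_nil, Bool.or_false, Bool.and_eq_true,
    Bool.or_eq_true, Bool.not_eq_true', decide_eq_false_iff_not, decide_eq_true_eq,
    String.reduceEq, false_and, true_and, and_false, or_false, false_or, and_assoc, or_assoc]
  constructor
  · rintro ⟨ha, hb, hc⟩
    refine ⟨ha, hb, ?_⟩
    rcases hc with h | h | h | h
    · exact Or.inl (h1 h)
    · exact Or.inl h
    · exact Or.inr h
    · exact Or.inl (h2 h)
  · rintro ⟨ha, hb, hc⟩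
    refine ⟨ha, hb, ?_⟩
    rcases hc with h | h
    · exact Or.inr (Or.inl h)
    · exact Or.inr (Or.inr (Or.inl h))

theorem exFlare (tags : List String) :
    (∃ tag ∈ tags, ¬tag = "" ∧
      (PySem.Str.startswith (PySem.Str.lower tag) "fit_swatch:" = true ∨
       PySem.Str.startswith (PySem.Str.lower tag) "fit:" = true ∨
       PySem.Str.startswith (PySem.Str.lower tag) "style:" = true) ∧
      (["eastcoast flare", "flare", "flare_women"] : List String).any (fun keyword => PySem.Str.isIn keyword (PySem.Str.lower tag)) = true) ↔
    ∃ t ∈ tags, pvAdds t "Flare" = true := by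
  refine exists_congr fun tag => and_congr_right fun _ => ?_
  have h1 := isIn_of_isIn_of_infix (a := "flare") (b := "eastcoast flare") (PySem.Str.lower tag)
    ⟨['e', 'a', 's', 't', 'c', 'o', 'a', 's', 't', ' '], [], by rfl⟩
  have h2 := isIn_of_isIn_of_infix (a := "flare") (b := "flare_women") (PySem.Str.lower tag)
    ⟨[], ['_', 'w', 'o', 'm', 'e', 'n'], rfl⟩
  simp only [pvAdds, List.any_cons, List.any_nil, Bool.or_false, Bool.and_eq_true,
    Bool.or_eq_true, Bool.not_eq_true', decide_eq_false_iff_not, decide_eq_true_eq,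
    String.reduceEq, false_and, true_and, and_false, or_false, false_or, and_assoc, or_assoc]
  constructor
  · rintro ⟨ha, hb, hc⟩
    refine ⟨ha, hb, ?_⟩
    rcases hc with h | h | h
    · exact h1 h
    · exact h
    · exact h2 h
  · rintro ⟨ha, hb, hc⟩
    exact ⟨ha, hb, Or.inr (Or.inl hc)⟩

theorem exBarrel (tags : List String) :
    (∃ tag ∈ tags, ¬tag = "" ∧
      (PySem.Str.startswith (PySem.Str.lower tag) "fit_swatch:" = true ∨
       PySem.Str.startswith (PySem.Str.lower tag) "fit:" = true ∨
       PySem.Str.startswith (PySem.Str.lower tag) "style:" = true) ∧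
      (["barrel"] : List String).any (fun keyword => PySem.Str.isIn keyword (PySem.Str.lower tag)) = true) ↔
    ∃ t ∈ tags, pvAdds t "Barrel" = true := by
  refine exists_congr fun tag => and_congr_right fun _ => ?_
  simp only [pvAdds, List.any_cons, List.any_nil, Bool.or_false, Bool.and_eq_true,
    Bool.or_eq_true, Bool.not_eq_true', decide_eq_false_iff_not, decide_eq_true_eq,
    String.reduceEq, false_and, true_and, and_false, or_false, false_or, and_assoc, or_assoc]

theorem exBaggy (tags : List String) :
    (∃ tag ∈ tags, ¬tag = "" ∧ PySem.Str.startswith (PySem.Str.lower tag) "fit_swatch:" = true ∧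
      (["90s", "baggy", "relaxed", "loose", "boyfriend"] : List String).any (fun keyword => PySem.Str.isIn keyword (PySem.Str.lower tag)) = true) ↔
    ∃ t ∈ tags, pvAdds t "Baggy" = true := by
  refine exists_congr fun tag => and_congr_right fun _ => ?_
  simp only [pvAdds, List.any_cons, List.any_nil, Bool.or_false, Bool.and_eq_true,
    Bool.or_eq_true, Bool.not_eq_true', decide_eq_false_iff_not, decide_eq_true_eq,
    String.reduceEq, false_and, true_and, and_false, or_false, false_or, and_assoc, or_assoc]
  constructor
  · rintro ⟨h1, h2, h3⟩
    exact ⟨h1, Or.inl h2, h2, h3⟩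
  · rintro ⟨h1, -, h2, h3⟩
    exact ⟨h1, h2, h3⟩

theorem exBoot (tags : List String) :
    (∃ tag ∈ tags, ¬tag = "" ∧ PySem.Str.startswith (PySem.Str.lower tag) "fit_swatch:" = true ∧
      (["boot"] : List String).any (fun keyword => PySem.Str.isIn keyword (PySem.Str.lower tag)) = true) ↔
    ∃ t ∈ tags, pvAdds t "Bootcut" = true := by
  refine exists_congr fun tag => and_congr_right fun _ => ?_
  simp only [pvAdds, List.any_cons, List.any_nil, Bool.or_false, Bool.and_eq_true,
    Bool.or_eq_true, Bool.not_eq_true', decide_eq_false_iff_not, decide_eq_true_eq,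
    String.reduceEq, false_and, true_and, and_false, or_false, false_or, and_assoc, or_assoc]
  constructor
  · rintro ⟨h1, h2, h3⟩
    exact ⟨h1, Or.inl h2, h2, h3⟩
  · rintro ⟨h1, -, h2, h3⟩
    exact ⟨h1, h2, h3⟩

-- ===== VERDICT (by name: the statement is the Claim_ definition above) =====
set_option maxHeartbeats 1600000 in
theorem derive_jean_style_spec : Claim_equal_derive_jean_style := by
  intro tags _
  show derive_jean_style tags = derive_jean_style_alt tags
  simp only [derive_jean_style, derive_jean_style_alt]
  refine if_congr ?_ rfl (if_congr ?_ rfl (if_congr ?_ rfl (if_congr ?_ rfl (if_congr ?_ rfl (if_congr ?_ rfl rfl)))))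
  · exact (A3_iff tags _).trans ((exWide tags).trans (containsB tags _ (Or.inl rfl)).symm)
  · exact (A3_iff tags _).trans ((exStraight tags).trans (containsB tags _ (Or.inr (Or.inl rfl))).symm)
  · exact (A3_iff tags _).trans ((exFlare tags).trans (containsB tags _ (Or.inr (Or.inr (Or.inl rfl)))).symm)
  · exact (A3_iff tags _).trans ((exBarrel tags).trans (containsB tags _ (Or.inr (Or.inr (Or.inr (Or.inl rfl))))).symm)
  · exact (Asw_iff tags _).trans ((exBaggy tags).trans (containsB tags _ (Or.inr (Or.inr (Or.inr (Or.inr (Or.inl rfl)))))).symm)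
  · exact (Asw_iff tags _).trans ((exBoot tags).trans (containsB tags _ (Or.inr (Or.inr (Or.inr (Or.inr (Or.inr rfl)))))).symm)
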